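-- pv_equiv track=rewrite | github.com/qtop/qtop | plugins/oar.py | _calculate_oar_state
-- ===== SOURCE A (Python) =====
-- def _calculate_oar_state(jobid_state_lot, nr_of_jobs, node_state_mapping):
--     """
--     If all resource ids within the node are either alive or dead or suspected, the respective label is given to the node.
--     Otherwise, a mixed-state is reported
--     """
--     # todo: make user-tuneable
--     states = [job_state_tpl[1] for job_state_tpl in jobid_state_lot]
--     alive = states.count('Alive')
--     dead = states.count('Dead')
--     suspected = states.count('Suspected')
--
--     if bool(alive) + bool(dead) + bool(suspected) > 1:
--         state = node_state_mapping['Mixed']  # TODO: investigate!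
--         return state
--     else:
--         return node_state_mapping[states[0]]
-- ===== SOURCE B (Python) =====
-- def _calculate_oar_state(jobid_state_lot, nr_of_jobs, node_state_mapping):
--     first = None
--     for _jobid, state in jobid_state_lot:
--         if state in ('Alive', 'Dead', 'Suspected'):
--             if first is None:
--                 first = state
--             elif state != first:
--                 return node_state_mapping['Mixed']
--     return node_state_mapping[jobid_state_lot[0][1]]
-- ===== Notes on version B (the rewrite author's own statement) =====
-- stated objective: alternative
-- what changed: Replaced the three full .count() scans plus bool-sum test with a single short-circuiting pass that remembers the first canonical label seen and returns the Mixed mapping the moment a second, different canonical label appears.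
import Mathlib
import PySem

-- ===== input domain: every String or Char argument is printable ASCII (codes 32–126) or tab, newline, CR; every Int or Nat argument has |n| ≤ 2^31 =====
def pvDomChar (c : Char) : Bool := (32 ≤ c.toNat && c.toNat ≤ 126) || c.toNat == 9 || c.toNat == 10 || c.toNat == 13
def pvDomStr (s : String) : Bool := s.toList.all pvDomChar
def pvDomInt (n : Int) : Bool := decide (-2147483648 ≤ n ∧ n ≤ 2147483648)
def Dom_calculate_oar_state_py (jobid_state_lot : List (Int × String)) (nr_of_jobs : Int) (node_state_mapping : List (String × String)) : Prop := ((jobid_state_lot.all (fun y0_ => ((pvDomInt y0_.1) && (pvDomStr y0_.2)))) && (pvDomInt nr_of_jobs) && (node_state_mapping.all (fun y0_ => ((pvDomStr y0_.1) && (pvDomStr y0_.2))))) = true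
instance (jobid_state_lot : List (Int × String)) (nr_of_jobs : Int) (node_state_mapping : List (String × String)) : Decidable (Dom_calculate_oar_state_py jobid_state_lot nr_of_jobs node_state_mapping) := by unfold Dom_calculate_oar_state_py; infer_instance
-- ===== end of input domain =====

-- B replaces A's three .count() scans and bool-sum by one short-circuiting pass that
-- remembers the first canonical label seen and bails out to 'Mixed' on a second,
-- different one (objective: alternative).

-- ===== PORT A =====
-- literal port of A: three counts, bool-sum test, dict lookups (KeyError/IndexError = none, excluded by Pre_)
def calculate_oar_state_py (jobid_state_lot : List (Int × String)) (nr_of_jobs : Int) (node_state_mapping : List (String × String)) : String :=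
  let states := jobid_state_lot.map (fun job_state_tpl => job_state_tpl.2)
  let alive := PySem.List.count states "Alive"
  let dead := PySem.List.count states "Dead"
  let suspected := PySem.List.count states "Suspected"
  if 1 < (if alive ≠ 0 then 1 else 0) + (if dead ≠ 0 then 1 else 0) + (if suspected ≠ (0:Nat) then (1:Nat) else 0) then
    (node_state_mapping.lookup "Mixed").getD ""   -- dict lookup; none = KeyError, outside Pre_
  else
    match PySem.List.pyGet? states 0 with         -- states[0]; none = IndexError, outside Pre_
    | some s => (node_state_mapping.lookup s).getD ""
    | none => ""

-- ===== PORT B =====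
-- the early-exit loop of Source B: `first` is the first canonical label seen so far;
-- the Bool result is 'the loop returned Mixed early'
def oarAltMixed (first : Option String) (l : List (Int × String)) : Bool :=
  match l with
  | [] => false
  | (_, state) :: rest =>
    if ["Alive", "Dead", "Suspected"].contains state then
      match first with
      | none => oarAltMixed (some state) rest
      | some f => if state ≠ f then true else oarAltMixed (some f) rest
    else oarAltMixed first rest

def calculate_oar_state_py_alt (jobid_state_lot : List (Int × String)) (nr_of_jobs : Int) (node_state_mapping : List (String × String)) : String :=
  if oarAltMixed none jobid_state_lot then
    (node_state_mapping.lookup "Mixed").getD ""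
  else
    match PySem.List.pyGet? jobid_state_lot 0 with  -- jobid_state_lot[0][1]; none = IndexError, outside Pre_
    | some p => (node_state_mapping.lookup p.2).getD ""
    | none => ""

-- ===== PRECONDITION & SPEC =====
-- Pre_ excludes exactly the inputs where A raises: empty jobid_state_lot (IndexError on
-- states[0]) and a missing dict key ('Mixed' in the mixed case, states[0] otherwise: KeyError).
def Pre_calculate_oar_state_py (jobid_state_lot : List (Int × String)) (nr_of_jobs : Int) (node_state_mapping : List (String × String)) : Prop :=
  let states := jobid_state_lot.map (fun t => t.2)
  if 1 < (if "Alive" ∈ states then 1 else 0) + (if "Dead" ∈ states then 1 else 0) + (if "Suspected" ∈ states then (1:Nat) else 0) then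
    (node_state_mapping.lookup "Mixed").isSome = true
  else
    states ≠ [] ∧ (node_state_mapping.lookup states.headI).isSome = true
instance (jobid_state_lot : List (Int × String)) (nr_of_jobs : Int) (node_state_mapping : List (String × String)) : Decidable (Pre_calculate_oar_state_py jobid_state_lot nr_of_jobs node_state_mapping) := by unfold Pre_calculate_oar_state_py; infer_instance

def pvWitness_calculate_oar_state_py : (List (Int × String)) × Int × (List (String × String)) :=
  ([(1, "Alive"), (2, "Alive")], 2, [("Alive", "A"), ("Mixed", "M")])

def Spec_calculate_oar_state_py (jobid_state_lot : List (Int × String)) (nr_of_jobs : Int) (node_state_mapping : List (String × String)) (out : String) : Prop := out = calculate_oar_state_py_alt jobid_state_lot nr_of_jobs node_state_mapping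
instance (jobid_state_lot : List (Int × String)) (nr_of_jobs : Int) (node_state_mapping : List (String × String)) (out : String) : Decidable (Spec_calculate_oar_state_py jobid_state_lot nr_of_jobs node_state_mapping out) := by unfold Spec_calculate_oar_state_py; infer_instance

-- ===== CLAIM (what is proved, stated in full; the proofs are below) =====
def Claim_equal_calculate_oar_state_py : Prop := ∀ (jobid_state_lot : List (Int × String)) (nr_of_jobs : Int) (node_state_mapping : List (String × String)), Dom_calculate_oar_state_py jobid_state_lot nr_of_jobs node_state_mapping → Pre_calculate_oar_state_py jobid_state_lot nr_of_jobs node_state_mapping → Spec_calculate_oar_state_py jobid_state_lot nr_of_jobs node_state_mapping (calculate_oar_state_py jobid_state_lot nr_of_jobs node_state_mapping)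

-- ===== LEMMAS AND PROOFS =====

theorem oarAltMixed_some_iff (f : String) (l : List (Int × String)) :
    oarAltMixed (some f) l = true ↔
      ∃ p ∈ l, ["Alive", "Dead", "Suspected"].contains p.2 = true ∧ p.2 ≠ f := by
  induction l with
  | nil => simp [oarAltMixed]
  | cons a t ih =>
    obtain ⟨i, s⟩ := a
    by_cases hc : ["Alive", "Dead", "Suspected"].contains s = true
    · by_cases hf : s = f
      · have e : oarAltMixed (some f) ((i, s) :: t) = oarAltMixed (some f) t := by
          simp only [oarAltMixed]; rw [if_pos hc, if_neg (by simp [hf])]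
        rw [e, ih]
        constructor
        · rintro ⟨p, hp, h⟩; exact ⟨p, List.mem_cons_of_mem _ hp, h⟩
        · rintro ⟨p, hp, hpc, hpf⟩
          rcases List.mem_cons.mp hp with h | h
          · exact absurd (show p.2 = f by rw [h]; exact hf) hpf
          · exact ⟨p, h, hpc, hpf⟩
      · have e : oarAltMixed (some f) ((i, s) :: t) = true := by
          simp only [oarAltMixed]; rw [if_pos hc, if_pos hf]
        exact iff_of_true e ⟨(i, s), List.mem_cons_self, hc, hf⟩
    · have e : oarAltMixed (some f) ((i, s) :: t) = oarAltMixed (some f) t := by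
        simp only [oarAltMixed]; rw [if_neg hc]
      rw [e, ih]
      constructor
      · rintro ⟨p, hp, h⟩; exact ⟨p, List.mem_cons_of_mem _ hp, h⟩
      · rintro ⟨p, hp, hpc, hpf⟩
        rcases List.mem_cons.mp hp with h | h
        · exact absurd (show (["Alive", "Dead", "Suspected"].contains s) = true by
            rw [show s = p.2 by rw [h]]; exact hpc) hc
        · exact ⟨p, h, hpc, hpf⟩

theorem oarAltMixed_none_iff (l : List (Int × String)) :
    oarAltMixed none l = true ↔
      ∃ p ∈ l, ∃ q ∈ l, ["Alive", "Dead", "Suspected"].contains p.2 = true ∧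
        ["Alive", "Dead", "Suspected"].contains q.2 = true ∧ p.2 ≠ q.2 := by
  induction l with
  | nil => simp [oarAltMixed]
  | cons a t ih =>
    obtain ⟨i, s⟩ := a
    by_cases hc : ["Alive", "Dead", "Suspected"].contains s = true
    · have e : oarAltMixed none ((i, s) :: t) = oarAltMixed (some s) t := by
        simp only [oarAltMixed]; rw [if_pos hc]
      rw [e, oarAltMixed_some_iff]
      constructor
      · rintro ⟨q, hq, hqc, hqs⟩
        exact ⟨(i, s), List.mem_cons_self, q, List.mem_cons_of_mem _ hq, hc, hqc, Ne.symm hqs⟩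
      · rintro ⟨p, hp, q, hq, hpc, hqc, hpq⟩
        rcases List.mem_cons.mp hp with hp | hp <;> rcases List.mem_cons.mp hq with hq | hq
        · exact absurd (by rw [hp, hq]) hpq
        · exact ⟨q, hq, hqc, fun h => hpq (by rw [hp, h])⟩
        · exact ⟨p, hp, hpc, fun h => hpq (by rw [hq]; exact h)⟩
        · by_cases hps : p.2 = s
          · exact ⟨q, hq, hqc, fun h => hpq (hps.trans h.symm)⟩
          · exact ⟨p, hp, hpc, hps⟩
    · have e : oarAltMixed none ((i, s) :: t) = oarAltMixed none t := by
        simp only [oarAltMixed]; rw [if_neg hc]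
      rw [e, ih]
      constructor
      · rintro ⟨p, hp, q, hq, h⟩
        exact ⟨p, List.mem_cons_of_mem _ hp, q, List.mem_cons_of_mem _ hq, h⟩
      · rintro ⟨p, hp, q, hq, hpc, hqc, hpq⟩
        rcases List.mem_cons.mp hp with hp | hp
        · exact absurd (show (["Alive", "Dead", "Suspected"].contains s) = true by
            rw [show s = p.2 by rw [hp]]; exact hpc) hc
        rcases List.mem_cons.mp hq with hq | hq
        · exact absurd (show (["Alive", "Dead", "Suspected"].contains s) = true by
            rw [show s = q.2 by rw [hq]]; exact hqc) hc
        exact ⟨p, hp, q, hq, hpc, hqc, hpq⟩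

-- A's bool-sum-of-flags test equals "two distinct canonical labels occur"
theorem flags_iff_two_distinct (states : List String) :
    (1 < (if "Alive" ∈ states then 1 else 0) + (if "Dead" ∈ states then 1 else 0) +
        (if "Suspected" ∈ states then (1:Nat) else 0)) ↔
      ∃ a ∈ states, ∃ b ∈ states, ["Alive", "Dead", "Suspected"].contains a = true ∧
        ["Alive", "Dead", "Suspected"].contains b = true ∧ a ≠ b := by
  constructor
  · intro h
    by_cases ha : "Alive" ∈ states <;> by_cases hd : "Dead" ∈ states <;>
      by_cases hs : "Suspected" ∈ states <;> simp [ha, hd, hs] at h <;>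
      first
        | exact ⟨"Alive", ha, "Dead", hd, by decide, by decide, by decide⟩
        | exact ⟨"Alive", ha, "Suspected", hs, by decide, by decide, by decide⟩
        | exact ⟨"Dead", hd, "Suspected", hs, by decide, by decide, by decide⟩
  · rintro ⟨a, ha, b, hb, hac, hbc, hab⟩
    have ha' : a = "Alive" ∨ a = "Dead" ∨ a = "Suspected" := by simpa using hac
    have hb' : b = "Alive" ∨ b = "Dead" ∨ b = "Suspected" := by simpa using hbc
    rcases ha' with h1 | h1 | h1 <;> rcases hb' with h2 | h2 | h2 <;> subst h1 <;> subst h2 <;>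
      first
        | exact absurd rfl hab
        | (simp [ha, hb]; split_ifs <;> omega)
        | (simp [ha, hb])

theorem count_ne_zero_iff (l : List String) (a : String) :
    (PySem.List.count l a ≠ 0) ↔ a ∈ l := by
  rw [PySem.List.count_eq, ← List.count_pos_iff]
  omega

theorem pyGet_zero_map (l : List (Int × String)) :
    PySem.List.pyGet? (l.map (fun t => t.2)) 0 = (PySem.List.pyGet? l 0).map (fun t => t.2) := by
  cases l <;> simp [PySem.List.pyGet?, PySem.List.pyIdx?]

-- ===== VERDICT (by name: the statement is the Claim_ definition above) =====
theorem calculate_oar_state_py_spec : Claim_equal_calculate_oar_state_py := by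
  intro jl n m _ _
  show calculate_oar_state_py jl n m = calculate_oar_state_py_alt jl n m
  unfold calculate_oar_state_py calculate_oar_state_py_alt
  simp only [count_ne_zero_iff]
  by_cases hmix : oarAltMixed none jl = true
  · have hflag : (1 < (if "Alive" ∈ jl.map (fun t => t.2) then 1 else 0) +
        (if "Dead" ∈ jl.map (fun t => t.2) then 1 else 0) +
        (if "Suspected" ∈ jl.map (fun t => t.2) then (1:Nat) else 0)) := by
      rw [flags_iff_two_distinct]
      rw [oarAltMixed_none_iff] at hmix
      obtain ⟨p, hp, q, hq, hpc, hqc, hpq⟩ := hmix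
      exact ⟨p.2, List.mem_map_of_mem hp, q.2, List.mem_map_of_mem hq, hpc, hqc, hpq⟩
    rw [if_pos hflag, if_pos hmix]
  · have hflag : ¬ (1 < (if "Alive" ∈ jl.map (fun t => t.2) then 1 else 0) +
        (if "Dead" ∈ jl.map (fun t => t.2) then 1 else 0) +
        (if "Suspected" ∈ jl.map (fun t => t.2) then (1:Nat) else 0)) := by
      rw [flags_iff_two_distinct]
      rintro ⟨a, ha, b, hb, hac, hbc, hab⟩
      apply hmix
      rw [oarAltMixed_none_iff]
      obtain ⟨p, hp, hpa⟩ := List.mem_map.mp ha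
      obtain ⟨q, hq, hqb⟩ := List.mem_map.mp hb
      exact ⟨p, hp, q, hq, hpa ▸ hac, hqb ▸ hbc, by rw [hpa, hqb]; exact hab⟩
    rw [if_neg hflag, if_neg hmix, pyGet_zero_map]
    cases PySem.List.pyGet? jl 0 <;> simp
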